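-- pv_equiv track=rewrite | github.com/drieshugaerts/order | order/main.py | end_rows
-- ===== SOURCE A (Python) =====
-- def end_rows(rows, length_of_array):
--     end_list = []
--     used_indices = []
--     pos = length_of_array - 1
--     for i in reversed(rows):
--         new_row_of_i = pos
--         if i in used_indices:
--             for j in range(len(used_indices)):
--                 if used_indices[j] == i:
--                     new_row_of_i = end_list[j]
--
--                     break
--         end_list = [new_row_of_i] + end_list
--         used_indices = [i] + used_indices
--         pos -= 1
--
--     return end_list
-- ===== SOURCE B (Python) =====
-- def end_rows(rows, length_of_array):
--     last = {}
--     for i, v in enumerate(rows):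
--         last[v] = i
--     offset = length_of_array - len(rows)
--     return [offset + last[v] for v in rows]
-- ===== Notes on version B (the rewrite author's own statement) =====
-- stated objective: faster
-- what changed: replaces the reversed quadratic scan with chained lookups by a single pass recording each value's last index in a dict, then a direct map
import Mathlib
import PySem

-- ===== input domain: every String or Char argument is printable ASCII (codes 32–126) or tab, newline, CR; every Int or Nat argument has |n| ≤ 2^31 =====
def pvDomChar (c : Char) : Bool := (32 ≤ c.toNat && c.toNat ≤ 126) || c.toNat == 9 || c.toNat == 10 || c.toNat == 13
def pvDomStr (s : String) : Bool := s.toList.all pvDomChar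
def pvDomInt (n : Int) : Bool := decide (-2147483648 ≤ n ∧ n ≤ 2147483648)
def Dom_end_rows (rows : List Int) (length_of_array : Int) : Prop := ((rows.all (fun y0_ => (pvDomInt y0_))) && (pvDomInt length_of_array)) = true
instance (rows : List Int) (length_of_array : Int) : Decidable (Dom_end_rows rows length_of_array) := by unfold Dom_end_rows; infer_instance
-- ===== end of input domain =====

-- B replaces A's quadratic reversed scan by one pass building a last-index dict plus a map (faster, asymptotic).

-- ===== PORT A =====
-- inner 'for j in range(len(used_indices)): if used_indices[j] == i: new = end_list[j]; break'
-- (scans used and end_list in parallel; returns dflt when no j matches)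
def endRowsInner (i : Int) : List Int → List Int → Int → Int
  | u :: us, e :: es, dflt => if u = i then e else endRowsInner i us es dflt
  | _, _, dflt => dflt

def end_rows (rows : List Int) (length_of_array : Int) : List Int :=
  (rows.reverse.foldl
    (fun (st : List Int × List Int × Int) (i : Int) =>
      let new_row_of_i := if st.2.1.contains i then endRowsInner i st.2.1 st.1 st.2.2 else st.2.2
      (new_row_of_i :: st.1, i :: st.2.1, st.2.2 - 1))
    ([], [], length_of_array - 1)).1

-- ===== PORT B =====
def end_rows_alt (rows : List Int) (length_of_array : Int) : List Int :=
  let last := (PySem.List.enumerate rows).foldl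
    (fun (d : PySem.Dict Int Int) (p : Int × Int) => d.insert p.2 p.1) PySem.Dict.empty
  let offset := length_of_array - rows.length
  rows.map (fun v => offset + last.getD v 0)

-- ===== PRECONDITION & SPEC =====
def Spec_end_rows (rows : List Int) (length_of_array : Int) (out : List Int) : Prop := out = end_rows_alt rows length_of_array
instance (rows : List Int) (length_of_array : Int) (out : List Int) : Decidable (Spec_end_rows rows length_of_array out) := by unfold Spec_end_rows; infer_instance

-- ===== CLAIM (what is proved, stated in full; the proofs are below) =====
def Claim_equal_end_rows : Prop := ∀ (rows : List Int) (length_of_array : Int), Dom_end_rows rows length_of_array → Spec_end_rows rows length_of_array (end_rows rows length_of_array)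

-- ===== LEMMAS AND PROOFS =====

-- index of the LAST occurrence of v in xs (0 when v is absent; only used for v ∈ xs)
def lastIdx : List Int → Int → Int
  | [], _ => 0
  | x :: xs, v => if v ∈ xs then 1 + lastIdx xs v else (0 : Int)

theorem lastIdx_cons_of_mem (x v : Int) (xs : List Int) (h : v ∈ xs) :
    lastIdx (x :: xs) v = 1 + lastIdx xs v := by
  simp [lastIdx, h]

theorem lastIdx_snoc (ys : List Int) (x v : Int) :
    lastIdx (ys ++ [x]) v = if v = x then (ys.length : Int) else lastIdx ys v := by
  induction ys with
  | nil => by_cases h : v = x <;> simp [lastIdx, h]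
  | cons y t ih =>
    by_cases hvx : v = x
    · subst hvx
      simp [lastIdx, ih, List.mem_append]
      omega
    · by_cases hvt : v ∈ t
      · simp [lastIdx, List.mem_append, hvt, hvx, ih]
      · simp [lastIdx, List.mem_append, hvt, hvx, ih]

def buildLast (rows : List Int) : PySem.Dict Int Int :=
  (PySem.List.enumerate rows).foldl
    (fun (d : PySem.Dict Int Int) (p : Int × Int) => d.insert p.2 p.1) PySem.Dict.empty

theorem buildLast_snoc (ys : List Int) (x : Int) :
    buildLast (ys ++ [x]) = (buildLast ys).insert x (ys.length : Int) := by
  simp [buildLast, PySem.List.enumerate_append, List.foldl_append]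

theorem buildLast_getD (rows : List Int) (v : Int) (h : v ∈ rows) :
    (buildLast rows).getD v 0 = lastIdx rows v := by
  induction rows using List.reverseRecOn with
  | nil => simp at h
  | append_singleton ys x ih =>
    rw [buildLast_snoc, lastIdx_snoc, PySem.Dict.getD_insert]
    by_cases hvx : v = x
    · simp [hvx]
    · have hvy : v ∈ ys := by
        rcases List.mem_append.mp h with h' | h'
        · exact h'
        · simp at h'; exact absurd h' hvx
      simp [hvx, ih hvy]

theorem endRowsInner_map (x : Int) (xs : List Int) (f : Int → Int) (d : Int)
    (h : x ∈ xs) : endRowsInner x xs (xs.map f) d = f x := by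
  induction xs with
  | nil => simp at h
  | cons u us ih =>
    by_cases hux : u = x
    · simp [endRowsInner, hux]
    · rcases List.mem_cons.mp h with h' | h'
      · exact absurd h'.symm hux
      · simp [endRowsInner, hux, ih h']

-- the state of A's loop after processing the reversed suffix xs
theorem end_rows_state (L : Int) (xs : List Int) :
    xs.foldr
      (fun (i : Int) (st : List Int × List Int × Int) =>
        let new_row_of_i := if st.2.1.contains i then endRowsInner i st.2.1 st.1 st.2.2 else st.2.2
        (new_row_of_i :: st.1, i :: st.2.1, st.2.2 - 1))
      ([], [], L - 1)
    = (xs.map (fun v => L - xs.length + lastIdx xs v), xs, L - 1 - xs.length) := by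
  induction xs with
  | nil => simp
  | cons x xs ih =>
    rw [List.foldr_cons, ih]
    refine Prod.ext ?_ (Prod.ext rfl ?_)
    · show (if xs.contains x then
          endRowsInner x xs (xs.map (fun v => L - xs.length + lastIdx xs v)) (L - 1 - xs.length)
        else (L - 1 - xs.length)) ::
          xs.map (fun v => L - xs.length + lastIdx xs v)
        = (x :: xs).map (fun v => L - (x :: xs).length + lastIdx (x :: xs) v)
      rw [List.map_cons]
      congr 1
      · by_cases hx : x ∈ xs
        · rw [if_pos (by simpa using hx), endRowsInner_map x xs _ _ hx,
            lastIdx_cons_of_mem x x xs hx]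
          simp; omega
        · rw [if_neg (by simpa using hx)]
          simp [lastIdx, hx]
          omega
      · refine List.map_congr_left (fun v hv => ?_)
        rw [lastIdx_cons_of_mem x v xs hv]
        simp; omega
    · show L - 1 - (xs.length : Int) - 1 = L - 1 - ((x :: xs).length : Int)
      simp; omega

theorem end_rows_alt_eq (rows : List Int) (L : Int) :
    end_rows_alt rows L = rows.map (fun v => L - rows.length + lastIdx rows v) := by
  unfold end_rows_alt
  refine List.map_congr_left (fun v hv => ?_)
  rw [show ((PySem.List.enumerate rows).foldl
      (fun (d : PySem.Dict Int Int) (p : Int × Int) => d.insert p.2 p.1) PySem.Dict.empty)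
      = buildLast rows from rfl, buildLast_getD rows v hv]

-- ===== VERDICT (by name: the statement is the Claim_ definition above) =====
theorem end_rows_spec : Claim_equal_end_rows := by
  intro rows L _
  show end_rows rows L = end_rows_alt rows L
  rw [end_rows_alt_eq]
  unfold end_rows
  rw [List.foldl_reverse, end_rows_state]
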